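-- pv_equiv track=rewrite | github.com/jirogihub8/DE-THI-HSG | CHỌN HỌC SINH GIỎI LỚP 12 CẤP  2024-2025 Thanh Hóa/CAU2.py | check
-- ===== SOURCE A (Python) =====
-- def check(x):
--     m=0
--     d=0
--     for i in x:
--         if i not in "ANH":
--             d+=1
--         else:
--             if m<d:
--                 m=d
--             d=0
--     if d!=0:
--         if m<d:
--             m=d
--     if m==0:
--         m=-1
--     return m
-- ===== SOURCE B (Python) =====
-- def check(x):
--     # Recursive run-decomposition: measure the leading run of non-"ANH" chars,
--     # then recurse past the separator; combine with max (-1 stands for "no run").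
--     def longest(s):
--         run = 0
--         while run < len(s) and s[run] not in "ANH":
--             run += 1
--         here = run if run > 0 else -1
--         if run < len(s):
--             return max(here, longest(s[run + 1:]))
--         return here
--     return longest(x)
-- ===== Notes on version B (the rewrite author's own statement) =====
-- stated objective: alternative
-- what changed: Replaced A's fused single-pass counter/maximum scan with a recursive run decomposition: measure the leading run of non-separator chars, recurse past the separator char, and combine the answers with max, using -1 for the no-run case.
import Mathlib
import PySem

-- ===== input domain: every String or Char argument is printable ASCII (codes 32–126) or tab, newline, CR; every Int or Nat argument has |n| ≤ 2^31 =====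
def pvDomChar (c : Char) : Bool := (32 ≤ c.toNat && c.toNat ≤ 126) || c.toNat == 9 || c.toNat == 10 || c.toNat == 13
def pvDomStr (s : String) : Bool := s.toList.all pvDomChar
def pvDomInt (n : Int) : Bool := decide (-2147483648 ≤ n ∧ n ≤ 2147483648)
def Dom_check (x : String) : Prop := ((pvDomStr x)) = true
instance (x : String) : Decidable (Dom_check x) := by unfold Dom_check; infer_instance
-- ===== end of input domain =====

-- B replaces A's fused counter/maximum scan by a recursive decomposition into
-- maximal runs (leading run, then recurse past the separator char); objective: alternative (not faster).

-- ===== PORT A =====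
-- `i not in "ANH"` for the loop char i
def pvSep (c : Char) : Bool := PySem.Chars.isIn [c] ['A', 'N', 'H']

def check (x : String) : Int :=
  let st := x.toList.foldl
    (fun (md : Int × Int) i =>
      if !(pvSep i) then (md.1, md.2 + 1)
      else ((if md.1 < md.2 then md.2 else md.1), 0))
    (0, 0)
  let m := st.1
  let d := st.2
  let m := if d ≠ 0 then (if m < d then d else m) else m
  if m = 0 then -1 else m

-- ===== PORT B =====
-- `longest s`: length of leading run of non-"ANH" chars (the while loop),
-- then recurse past the separator and combine with max.
def checkAltGo (s : List Char) : Int :=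
  let run := (s.takeWhile (fun c => !(pvSep c))).length
  let here : Int := if run > 0 then (run : Int) else -1
  if run < s.length then max here (checkAltGo (s.drop (run + 1))) else here
termination_by s.length
decreasing_by simp [List.length_drop]; omega

def check_alt (x : String) : Int := checkAltGo x.toList

-- ===== PRECONDITION & SPEC =====
def Spec_check (x : String) (out : Int) : Prop := out = check_alt x
instance (x : String) (out : Int) : Decidable (Spec_check x out) := by unfold Spec_check; infer_instance

-- ===== CLAIM (what is proved, stated in full; the proofs are below) =====
def Claim_equal_check : Prop := ∀ (x : String), Dom_check x → Spec_check x (check x)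

-- ===== LEMMAS AND PROOFS =====

-- proof-side helper: best run value (as a Nat) over s, with a current open run of length d
def pvBest (s : List Char) (d : Nat) : Nat :=
  let r := (s.takeWhile (fun c => !(pvSep c))).length
  if r < s.length then max (d + r) (pvBest (s.drop (r + 1)) 0) else d + r
termination_by s.length
decreasing_by simp [List.length_drop]; omega

-- -1-for-0 encoding
def pvRes (k : Nat) : Int := if k = 0 then -1 else (k : Int)

theorem pvRes_max (a b : Nat) : pvRes (max a b) = max (pvRes a) (pvRes b) := by
  unfold pvRes
  rcases Nat.eq_zero_or_pos a with ha | ha <;> rcases Nat.eq_zero_or_pos b with hb | hb <;>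
    simp_all <;> omega

theorem checkAltGo_eq_pvRes (s : List Char) : checkAltGo s = pvRes (pvBest s 0) := by
  rw [checkAltGo, pvBest]
  set r := (s.takeWhile (fun c => !(pvSep c))).length with hr
  by_cases h : r < s.length
  · simp only [h, if_true]
    rw [checkAltGo_eq_pvRes (s.drop (r + 1))]
    rw [Nat.zero_add, pvRes_max]
    congr 1
    unfold pvRes
    split_ifs <;> omega
  · simp only [h, if_false]
    unfold pvRes
    split_ifs <;> omega
termination_by s.length
decreasing_by simp [List.length_drop]; omega

-- A's step function
def pvStep (md : Int × Int) (i : Char) : Int × Int :=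
  if !(pvSep i) then (md.1, md.2 + 1)
  else ((if md.1 < md.2 then md.2 else md.1), 0)

theorem foldl_pvStep_run (t : List Char) (ht : ∀ c ∈ t, pvSep c = false) (m d : Int) :
    t.foldl pvStep (m, d) = (m, d + t.length) := by
  induction t generalizing d with
  | nil => simp
  | cons c t ih =>
    have hc : pvSep c = false := ht c (by simp)
    have ht' : ∀ c ∈ t, pvSep c = false := fun c hc => ht c (by simp [hc])
    simp only [List.foldl_cons, pvStep, hc, Bool.not_false, if_true]
    rw [ih ht']
    simp
    ring

-- A's finalisation
def pvFin (md : Int × Int) : Int :=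
  let m := md.1
  let d := md.2
  let m := if d ≠ 0 then (if m < d then d else m) else m
  if m = 0 then -1 else m

theorem pvFin_nat (m d : Nat) : pvFin ((m : Int), (d : Int)) = pvRes (max m d) := by
  unfold pvFin pvRes
  split_ifs <;> push_cast at * <;> omega

theorem key_lemma (s : List Char) (m d : Nat) :
    pvFin (s.foldl pvStep ((m : Int), (d : Int))) = pvRes (max m (pvBest s d)) := by
  rw [pvBest]
  have hsplit : s = s.takeWhile (fun c => !(pvSep c)) ++ s.dropWhile (fun c => !(pvSep c)) :=
    (List.takeWhile_append_dropWhile).symm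
  set t := s.takeWhile (fun c => !(pvSep c)) with htdef
  have hpre : t <+: s := List.takeWhile_prefix _
  have htall : ∀ c ∈ t, pvSep c = false := by
    intro c hc
    have := List.mem_takeWhile_imp hc
    simpa using this
  by_cases h : t.length < s.length
  · -- there is a separator: dropWhile is nonempty
    have hdrop : s.dropWhile (fun c => !(pvSep c)) ≠ [] := by
      intro hnil
      have : s.length = t.length := by
        conv_lhs => rw [hsplit]
        simp [hnil]
      omega
    obtain ⟨c, rest, hcr⟩ := List.exists_cons_of_ne_nil hdrop
    have hcsep : pvSep c = true := by
      have h0 := List.head_dropWhile_not (p := fun c => !(pvSep c)) (l := s) (by simp [hcr])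
      simp only [hcr, List.head_cons] at h0
      simpa using h0
    have hrest : s.drop (t.length + 1) = rest := by
      have hdt : s.drop t.length = c :: rest := by
        conv_lhs => rw [hsplit]
        rw [List.drop_left' rfl, hcr]
      rw [← List.drop_drop, hdt]
      simp
    conv_lhs => rw [hsplit, hcr]
    rw [List.foldl_append, foldl_pvStep_run t htall]
    simp only [List.foldl_cons, pvStep, hcsep, Bool.not_true, Bool.false_eq_true, if_false]
    have hstate : ((if ((m : Int)) < (d : Int) + (t.length : Int) then (d : Int) + (t.length : Int) else ((m : Int))), (0 : Int))
        = (((max m (d + t.length) : Nat) : Int), (((0 : Nat)) : Int)) := by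
      simp only [Prod.mk.injEq]
      refine ⟨?_, by simp⟩
      push_cast
      split_ifs <;> omega
    rw [hstate, key_lemma rest (max m (d + t.length)) 0]
    rw [if_pos h, hrest]
    congr 1
    omega
  · -- no separator: whole string is the run
    have hteq : t = s := hpre.eq_of_length (by have := hpre.length_le; omega)
    rw [if_neg h]
    conv_lhs => rw [← hteq]
    rw [foldl_pvStep_run t htall]
    have hcast : ((d : Int) + (t.length : Int)) = (((d + t.length : Nat)) : Int) := by push_cast; ring
    rw [hcast, pvFin_nat]
termination_by s.length
decreasing_by
  have hl : rest.length = s.length - (t.length + 1) := by rw [← hrest]; simp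
  omega

-- ===== VERDICT (by name: the statement is the Claim_ definition above) =====
theorem check_spec : Claim_equal_check := by
  intro x _
  unfold Spec_check check check_alt
  rw [checkAltGo_eq_pvRes]
  have hk := key_lemma x.toList 0 0
  simp only [Nat.cast_zero, Nat.zero_max] at hk
  exact hk
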